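-- pv_equiv track=rewrite | github.com/syn-ce/advent-of-code-2024 | 20/main.py | assign_costs_to_track
-- ===== SOURCE A (Python) =====
-- from collections import deque
--
-- def assign_costs_to_track(racetrack: list[list[str]], start_pos: tuple[int, int]) -> dict[tuple[int, int], int]:
--     q = deque([start_pos])
--     costs = deque([0])
--     track_costs = dict()
--
--     while len(q) > 0:
--         row, col = q.popleft()
--         cost = costs.popleft()
--
--         if row < 0 or row >= len(racetrack) or col < 0 or col >= len(racetrack[row]) or racetrack[row][col] == '#' or (
--                 row, col) in track_costs:  # Can't process or already processed
--             continue
--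
--         track_costs[(row, col)] = cost
--
--         for direction in [(0, 1), (1, 0), (-1, 0), (0, -1)]:
--             q.append((row + direction[0], col + direction[1]))
--             costs.append(cost + 1)
--
--     return track_costs
-- ===== SOURCE B (Python) =====
-- def assign_costs_to_track(racetrack: list[list[str]], start_pos: tuple[int, int]) -> dict[tuple[int, int], int]:
--     track_costs = {}
--     frontier = [start_pos]
--     cost = 0
--     while frontier:
--         next_frontier = []
--         for row, col in frontier:
--             if (0 <= row < len(racetrack) and 0 <= col < len(racetrack[row])
--                     and racetrack[row][col] != '#' and (row, col) not in track_costs):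
--                 track_costs[(row, col)] = cost
--                 next_frontier += [(row, col + 1), (row + 1, col), (row - 1, col), (row, col - 1)]
--         frontier = next_frontier
--         cost += 1
--     return track_costs
-- ===== Notes on version B (the rewrite author's own statement) =====
-- stated objective: alternative
-- what changed: Replaces A's interleaved two-deque BFS (parallel position and cost queues) by a level-synchronous BFS that keeps a frontier list and a single depth counter, processing one whole cost layer per outer iteration.
import Mathlib
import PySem

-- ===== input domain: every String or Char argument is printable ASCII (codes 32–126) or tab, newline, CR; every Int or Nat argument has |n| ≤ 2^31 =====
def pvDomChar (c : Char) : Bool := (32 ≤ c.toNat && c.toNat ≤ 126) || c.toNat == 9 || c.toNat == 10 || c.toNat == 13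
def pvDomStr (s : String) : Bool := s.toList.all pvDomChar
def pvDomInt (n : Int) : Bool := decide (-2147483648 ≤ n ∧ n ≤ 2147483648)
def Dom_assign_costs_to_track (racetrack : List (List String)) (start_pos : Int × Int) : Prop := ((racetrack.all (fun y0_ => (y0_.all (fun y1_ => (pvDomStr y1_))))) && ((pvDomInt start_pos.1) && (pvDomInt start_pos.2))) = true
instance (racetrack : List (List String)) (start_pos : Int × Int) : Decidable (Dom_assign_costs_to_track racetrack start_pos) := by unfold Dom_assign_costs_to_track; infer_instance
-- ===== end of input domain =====

-- B replaces A's two parallel deques by a level-synchronous BFS (frontier list + depth counter); same return value, no speed claim.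

-- ===== PORT A =====

-- in-bounds non-wall cells of the grid; used only as a termination measure for the BFS loops
def pvFreeCells (racetrack : List (List String)) : List (Int × Int) :=
  (List.range racetrack.length).flatMap (fun r =>
    (List.range (racetrack.getD r []).length).filterMap (fun c =>
      if ((racetrack.getD r []).getD c "" == "#") then none else some ((r : Int), (c : Int))))

-- number of free cells not yet recorded in the dict (termination measure)
def pvUnseen (racetrack : List (List String)) (tc : PySem.Dict (Int × Int) Int) : Nat :=
  ((pvFreeCells racetrack).filter (fun p => !(tc.contains p))).length

-- A's skip test: row/col out of bounds, wall, or already processed (one flat or-chain, as in the Python guard)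
def pvSkipA (racetrack : List (List String)) (tc : PySem.Dict (Int × Int) Int) (row col : Int) : Bool :=
  decide (row < 0) || decide ((racetrack.length : Int) ≤ row) ||
  decide (col < 0) || decide ((((PySem.List.pyGet? racetrack row).getD []).length : Int) ≤ col) ||
  (((PySem.List.pyGet? ((PySem.List.pyGet? racetrack row).getD []) col).getD "") == "#") ||
  tc.contains (row, col)

-- B's test: the cell is valid, not a wall, not yet recorded (one flat and-chain, as in Source B's guard)
def pvValidB (racetrack : List (List String)) (tc : PySem.Dict (Int × Int) Int) (row col : Int) : Bool :=
  decide (0 ≤ row) && decide (row < (racetrack.length : Int)) &&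
  decide (0 ≤ col) && decide (col < ((((PySem.List.pyGet? racetrack row).getD []).length : Int))) &&
  !(((PySem.List.pyGet? ((PySem.List.pyGet? racetrack row).getD []) col).getD "") == "#") &&
  !(tc.contains (row, col))

-- A's skip test is the negation of B's validity test (needed by the termination argument, hence above the ports)
theorem pvSkipA_eq_not_validB (racetrack : List (List String)) (tc : PySem.Dict (Int × Int) Int)
    (row col : Int) : pvSkipA racetrack tc row col = !(pvValidB racetrack tc row col) := by
  simp only [pvSkipA, pvValidB]
  rw [show decide (0 ≤ row) = !decide (row < 0) from by by_cases h : row < 0 <;> simp [h] <;> omega,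
      show decide (row < (racetrack.length : Int)) = !decide ((racetrack.length : Int) ≤ row) from by
        by_cases h : (racetrack.length : Int) ≤ row <;> simp [h] <;> omega,
      show decide (0 ≤ col) = !decide (col < 0) from by by_cases h : col < 0 <;> simp [h] <;> omega,
      show decide (col < ((((PySem.List.pyGet? racetrack row).getD []).length : Int)))
          = !decide ((((PySem.List.pyGet? racetrack row).getD []).length : Int) ≤ col) from by
        by_cases h : (((PySem.List.pyGet? racetrack row).getD []).length : Int) ≤ col <;> simp [h] <;> omega]
  cases decide (row < 0) <;>
    cases decide ((racetrack.length : Int) ≤ row) <;>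
    cases decide (col < 0) <;>
    cases decide ((((PySem.List.pyGet? racetrack row).getD []).length : Int) ≤ col) <;>
    cases (((PySem.List.pyGet? ((PySem.List.pyGet? racetrack row).getD []) col).getD "") == "#") <;>
    cases tc.contains (row, col) <;> rfl

-- strict filter-length comparison used by the measure lemmas
theorem pv_filter_lt {α : Type} {l : List α} {p q : α → Bool} (x : α) (hx : x ∈ l)
    (hq : q x = true) (hp : p x = false) (himp : ∀ a, p a = true → q a = true) :
    (l.filter p).length < (l.filter q).length := by
  obtain ⟨s, t, rfl⟩ := List.append_of_mem hx
  have hs : s.countP p ≤ s.countP q := List.countP_mono_left (fun a _ h => himp a h)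
  have ht : t.countP p ≤ t.countP q := List.countP_mono_left (fun a _ h => himp a h)
  simp only [← List.countP_eq_length_filter, List.countP_append, List.countP_cons, hq, hp,
    Bool.false_eq_true, eq_self_iff_true, if_false, if_true]
  omega

-- a valid cell is a free cell
theorem pv_mem_freeCells (racetrack : List (List String)) (tc : PySem.Dict (Int × Int) Int)
    (row col : Int) (hv : pvValidB racetrack tc row col = true) :
    (row, col) ∈ pvFreeCells racetrack := by
  simp only [pvValidB, Bool.and_eq_true, decide_eq_true_eq, Bool.not_eq_true'] at hv
  obtain ⟨⟨⟨⟨⟨h0, h1⟩, h2⟩, h3⟩, h4⟩, h5⟩ := hv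
  have hrow : (PySem.List.pyGet? racetrack row).getD [] = racetrack.getD row.toNat [] := by
    rw [PySem.List.pyGet?_eq_some_getElem racetrack h0 h1]
    simp [List.getD_eq_getElem?_getD, List.getElem?_eq_getElem (by omega : row.toNat < racetrack.length)]
  have hcol : (PySem.List.pyGet? ((PySem.List.pyGet? racetrack row).getD []) col).getD ""
      = (racetrack.getD row.toNat []).getD col.toNat "" := by
    rw [hrow] at h3 ⊢
    have hlen : col.toNat < (racetrack.getD row.toNat []).length := by omega
    rw [PySem.List.pyGet?_eq_some_getElem _ h2 h3, Option.getD_some]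
    exact (List.getD_eq_getElem _ _ hlen).symm
  simp only [pvFreeCells, List.mem_flatMap, List.mem_range, List.mem_filterMap]
  refine ⟨row.toNat, by omega, col.toNat, by rw [← hrow]; omega, ?_⟩
  rw [← hcol]
  simp [h4, Int.toNat_of_nonneg h0, Int.toNat_of_nonneg h2]

-- strict decrease of the measure on a successful insert
theorem pvUnseen_insert_lt (racetrack : List (List String)) (tc : PySem.Dict (Int × Int) Int)
    (row col cost : Int) (hv : pvValidB racetrack tc row col = true) :
    pvUnseen racetrack (tc.insert (row, col) cost) < pvUnseen racetrack tc := by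
  have hc : tc.contains (row, col) = false := by
    simp only [pvValidB, Bool.and_eq_true, Bool.not_eq_true'] at hv; exact hv.2
  refine pv_filter_lt (row, col) (pv_mem_freeCells racetrack tc row col hv) (by simp [hc]) ?_ ?_
  · simp [PySem.Dict.contains_insert_self]
  · intro a ha
    simp only [Bool.not_eq_true'] at ha ⊢
    have := PySem.Dict.contains_insert (d := tc) (k := (row, col)) (v := cost) (k' := a)
    rw [this] at ha
    exact (Bool.or_eq_false_iff.mp ha).2

-- the measure never increases on an insert
theorem pvUnseen_insert_le (racetrack : List (List String)) (tc : PySem.Dict (Int × Int) Int)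
    (k : Int × Int) (cost : Int) :
    pvUnseen racetrack (tc.insert k cost) ≤ pvUnseen racetrack tc := by
  simp only [pvUnseen, ← List.countP_eq_length_filter]
  refine List.countP_mono_left (fun a _ ha => ?_)
  simp only [Bool.not_eq_true'] at ha ⊢
  have := PySem.Dict.contains_insert (d := tc) (k := k) (v := cost) (k' := a)
  rw [this] at ha
  exact (Bool.or_eq_false_iff.mp ha).2

-- the two decrease facts for A's loop, named so the loop's well-founded recursion stays small
theorem pvALoop_dec_skip (racetrack : List (List String)) (tc : PySem.Dict (Int × Int) Int)
    (q' : List (Int × Int)) (row col : Int) :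
    5 * pvUnseen racetrack tc + q'.length < 5 * pvUnseen racetrack tc + ((row, col) :: q').length := by
  simp only [List.length_cons]; omega

theorem pvALoop_dec_ins (racetrack : List (List String)) (tc : PySem.Dict (Int × Int) Int)
    (q' : List (Int × Int)) (row col cost : Int) (h : ¬ pvSkipA racetrack tc row col = true) :
    5 * pvUnseen racetrack (tc.insert (row, col) cost)
      + (q' ++ [(row, col + 1), (row + 1, col), (row - 1, col), (row, col - 1)]).length
    < 5 * pvUnseen racetrack tc + ((row, col) :: q').length := by
  have hv : pvValidB racetrack tc row col = true := by
    have := pvSkipA_eq_not_validB racetrack tc row col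
    cases hb : pvValidB racetrack tc row col
    · rw [hb] at this; simp at this; exact absurd this h
    · rfl
  have h1 := pvUnseen_insert_lt racetrack tc row col cost hv
  simp only [List.length_append, List.length_cons, List.length_nil]; omega

-- A's while loop: q/costs are the two deques, tc the dict being filled
def pvALoop (racetrack : List (List String)) :
    List (Int × Int) → List Int → PySem.Dict (Int × Int) Int → PySem.Dict (Int × Int) Int
  | [], _, tc => tc
  | _ :: _, [], tc => tc   -- unreachable: the two deques always have equal length
  | (row, col) :: q', cost :: costs', tc =>
    if h : pvSkipA racetrack tc row col then
      pvALoop racetrack q' costs' tc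
    else
      -- the for-loop over the four directions, unrolled: append the 4 neighbours and 4 costs
      pvALoop racetrack (q' ++ [(row, col + 1), (row + 1, col), (row - 1, col), (row, col - 1)])
        (costs' ++ [cost + 1, cost + 1, cost + 1, cost + 1])
        (tc.insert (row, col) cost)
  termination_by q _ tc => 5 * pvUnseen racetrack tc + q.length
  decreasing_by
  · exact pvALoop_dec_skip racetrack tc q' row col
  · exact pvALoop_dec_ins racetrack tc q' row col cost h

def assign_costs_to_track (racetrack : List (List String)) (start_pos : Int × Int) : List (Int × Int × Int) :=
  (pvALoop racetrack [start_pos] [0] PySem.Dict.empty).items.map (fun p => (p.1.1, p.1.2, p.2))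

-- ===== PORT B =====

-- body of B's inner for-loop: process one frontier cell at the current cost
def pvBStep (racetrack : List (List String)) (cost : Int)
    (st : PySem.Dict (Int × Int) Int × List (Int × Int)) (cell : Int × Int) :
    PySem.Dict (Int × Int) Int × List (Int × Int) :=
  if pvValidB racetrack st.1 cell.1 cell.2 then
    (st.1.insert (cell.1, cell.2) cost,
     st.2 ++ [(cell.1, cell.2 + 1), (cell.1 + 1, cell.2), (cell.1 - 1, cell.2), (cell.1, cell.2 - 1)])
  else st

-- after the inner loop the measure has not increased …
theorem pvBFold_le (racetrack : List (List String)) (cost : Int) (xs : List (Int × Int)) :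
    ∀ (tc : PySem.Dict (Int × Int) Int) (acc : List (Int × Int)),
    pvUnseen racetrack (xs.foldl (pvBStep racetrack cost) (tc, acc)).1 ≤ pvUnseen racetrack tc := by
  induction xs with
  | nil => intro tc acc; simp [List.foldl]
  | cons x xs ih =>
    intro tc acc
    simp only [List.foldl_cons]
    by_cases hv : pvValidB racetrack tc x.1 x.2
    · simp only [pvBStep, hv, if_pos]
      exact le_trans (ih _ _) (pvUnseen_insert_le racetrack tc (x.1, x.2) cost)
    · simp only [pvBStep, hv, if_neg, Bool.false_eq_true, not_false_eq_true]
      exact ih tc acc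

-- … and it has strictly decreased whenever the next frontier grew
theorem pvBFold_lt (racetrack : List (List String)) (cost : Int) (xs : List (Int × Int)) :
    ∀ (tc : PySem.Dict (Int × Int) Int) (acc : List (Int × Int)),
    acc.length < (xs.foldl (pvBStep racetrack cost) (tc, acc)).2.length →
    pvUnseen racetrack (xs.foldl (pvBStep racetrack cost) (tc, acc)).1 < pvUnseen racetrack tc := by
  induction xs with
  | nil => intro tc acc h; simp at h
  | cons x xs ih =>
    intro tc acc h
    simp only [List.foldl_cons] at h ⊢
    by_cases hv : pvValidB racetrack tc x.1 x.2
    · simp only [pvBStep, hv, if_pos]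
      exact lt_of_le_of_lt (pvBFold_le racetrack cost xs _ _)
        (pvUnseen_insert_lt racetrack tc x.1 x.2 cost hv)
    · simp only [pvBStep, hv, if_neg, Bool.false_eq_true, not_false_eq_true] at h ⊢
      exact ih tc acc h

-- the decrease fact for B's level loop
theorem pvBGo_dec (racetrack : List (List String)) (cost : Int) (frontier : List (Int × Int))
    (tc : PySem.Dict (Int × Int) Int) (hne : ¬ frontier = []) :
    2 * pvUnseen racetrack (frontier.foldl (pvBStep racetrack cost) (tc, [])).1
      + (if (frontier.foldl (pvBStep racetrack cost) (tc, [])).2 = [] then 0 else 1)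
    < 2 * pvUnseen racetrack tc + (if frontier = [] then 0 else 1) := by
  have hle := pvBFold_le racetrack cost frontier tc []
  rcases hnil : (frontier.foldl (pvBStep racetrack cost) (tc, [])).2 with _ | ⟨y, ys⟩
  · simp [hnil, hne]
    omega
  · have hlt := pvBFold_lt racetrack cost frontier tc [] (by simp [hnil])
    simp [hnil, hne]
    omega

-- B's while loop over levels
def pvBGo (racetrack : List (List String)) (frontier : List (Int × Int)) (cost : Int)
    (tc : PySem.Dict (Int × Int) Int) : PySem.Dict (Int × Int) Int :=
  if hne : frontier = [] then tc
  else
    let st := frontier.foldl (pvBStep racetrack cost) (tc, [])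
    pvBGo racetrack st.2 (cost + 1) st.1
  termination_by 2 * pvUnseen racetrack tc + (if frontier = [] then 0 else 1)
  decreasing_by
    simp only [List.foldl_attach]
    exact pvBGo_dec racetrack cost frontier tc hne

def assign_costs_to_track_alt (racetrack : List (List String)) (start_pos : Int × Int) : List (Int × Int × Int) :=
  (pvBGo racetrack [start_pos] 0 PySem.Dict.empty).items.map (fun p => (p.1.1, p.1.2, p.2))

-- ===== PRECONDITION & SPEC =====
def Spec_assign_costs_to_track (racetrack : List (List String)) (start_pos : Int × Int) (out : List (Int × Int × Int)) : Prop := out = assign_costs_to_track_alt racetrack start_pos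
instance (racetrack : List (List String)) (start_pos : Int × Int) (out : List (Int × Int × Int)) : Decidable (Spec_assign_costs_to_track racetrack start_pos out) := by unfold Spec_assign_costs_to_track; infer_instance

-- ===== CLAIM (what is proved, stated in full; the proofs are below) =====
def Claim_equal_assign_costs_to_track : Prop := ∀ (racetrack : List (List String)) (start_pos : Int × Int), Dom_assign_costs_to_track racetrack start_pos → Spec_assign_costs_to_track racetrack start_pos (assign_costs_to_track racetrack start_pos)

-- ===== LEMMAS AND PROOFS =====

-- main invariant: A's interleaved queue (current level xs at cost c, next level ys at cost c+1)
-- computes the same dict as B's level loop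
theorem pvMain (racetrack : List (List String)) (n : Nat) :
    ∀ (xs ys : List (Int × Int)) (c : Int) (tc : PySem.Dict (Int × Int) Int),
      10 * pvUnseen racetrack tc + 2 * (xs.length + ys.length) + (if xs = [] then 1 else 0) ≤ n →
      pvALoop racetrack (xs ++ ys)
          (List.replicate xs.length c ++ List.replicate ys.length (c + 1)) tc
        = pvBGo racetrack (xs.foldl (pvBStep racetrack c) (tc, ys)).2 (c + 1)
            (xs.foldl (pvBStep racetrack c) (tc, ys)).1 := by
  induction n using Nat.strong_induction_on with
  | _ n ih =>
    intro xs ys c tc hm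
    cases xs with
    | nil =>
      simp only [List.foldl_nil, List.nil_append, List.length_nil, List.replicate_zero]
      cases ys with
      | nil =>
        rw [pvALoop, pvBGo]
        rfl
      | cons y ys' =>
        rw [if_pos rfl] at hm
        have hm' : 10 * pvUnseen racetrack tc + 2 * ((y :: ys').length + ([] : List (Int × Int)).length)
            + (if (y :: ys') = ([] : List (Int × Int)) then 1 else 0) ≤ n - 1 := by
          rw [if_neg (List.cons_ne_nil y ys')]
          simp only [List.length_nil, List.length_cons] at hm ⊢
          omega
        have hn : n - 1 < n := by omega
        have H := ih (n - 1) hn (y :: ys') [] (c + 1) tc hm'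
        simp only [List.append_nil, List.length_nil, List.replicate_zero] at H
        rw [pvBGo, dif_neg (List.cons_ne_nil y ys')]
        exact H
    | cons x xs' =>
      obtain ⟨row, col⟩ := x
      simp only [List.cons_append, List.length_cons, List.replicate_succ, List.cons_append,
        List.foldl_cons]
      rw [pvALoop, pvSkipA_eq_not_validB]
      cases hv : pvValidB racetrack tc row col
      · simp only [Bool.not_false, dite_true]
        have hstep : pvBStep racetrack c (tc, ys) (row, col) = (tc, ys) := by
          simp [pvBStep, hv]
        rw [hstep]
        have hm' : 10 * pvUnseen racetrack tc + 2 * (xs'.length + ys.length)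
            + (if xs' = [] then 1 else 0) ≤ n - 1 := by
          simp only [List.length_cons, if_neg (List.cons_ne_nil (row, col) xs')] at hm
          split_ifs <;> omega
        have hn : n - 1 < n := by
          simp only [List.length_cons, if_neg (List.cons_ne_nil (row, col) xs')] at hm; omega
        exact ih (n - 1) hn xs' ys c tc hm'
      · simp only [Bool.not_true, dite_false]
        have hstep : pvBStep racetrack c (tc, ys) (row, col)
            = (tc.insert (row, col) c, ys ++ [(row, col + 1), (row + 1, col), (row - 1, col), (row, col - 1)]) := by
          simp [pvBStep, hv]
        rw [hstep]
        have hlt := pvUnseen_insert_lt racetrack tc row col c hv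
        have hq : (xs' ++ ys) ++ [(row, col + 1), (row + 1, col), (row - 1, col), (row, col - 1)]
            = xs' ++ (ys ++ [(row, col + 1), (row + 1, col), (row - 1, col), (row, col - 1)]) :=
          List.append_assoc _ _ _
        have hcosts : (List.replicate xs'.length c ++ List.replicate ys.length (c + 1))
              ++ [c + 1, c + 1, c + 1, c + 1]
            = List.replicate xs'.length c
              ++ List.replicate (ys ++ [(row, col + 1), (row + 1, col), (row - 1, col), (row, col - 1)]).length (c + 1) := by
          rw [List.append_assoc]
          congr 1
          rw [show ([c + 1, c + 1, c + 1, c + 1] : List Int) = List.replicate 4 (c + 1) from rfl,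
            ← List.replicate_add]
          simp
        rw [hq, hcosts]
        have hm' : 10 * pvUnseen racetrack (tc.insert (row, col) c)
            + 2 * (xs'.length + (ys ++ [(row, col + 1), (row + 1, col), (row - 1, col), (row, col - 1)]).length)
            + (if xs' = [] then 1 else 0) ≤ n - 1 := by
          simp only [List.length_append, List.length_cons, List.length_nil,
            if_neg (List.cons_ne_nil (row, col) xs')] at hm ⊢
          split_ifs <;> omega
        have hn : n - 1 < n := by
          simp only [List.length_cons, if_neg (List.cons_ne_nil (row, col) xs')] at hm; omega
        exact ih (n - 1) hn xs' _ c (tc.insert (row, col) c) hm'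

-- ===== VERDICT (by name: the statement is the Claim_ definition above) =====
theorem assign_costs_to_track_spec : Claim_equal_assign_costs_to_track := by
  intro racetrack start_pos _
  unfold Spec_assign_costs_to_track assign_costs_to_track assign_costs_to_track_alt
  have h := pvMain racetrack
    (10 * pvUnseen racetrack PySem.Dict.empty + 2) [start_pos] [] 0 PySem.Dict.empty
    (by simp)
  simp only [List.append_nil, List.length_cons, List.length_nil, List.replicate_succ,
    List.replicate_zero, List.append_nil] at h
  rw [h, show pvBGo racetrack [start_pos] 0 PySem.Dict.empty
      = pvBGo racetrack (([start_pos].foldl (pvBStep racetrack 0) (PySem.Dict.empty, []))).2 (0 + 1)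
          (([start_pos].foldl (pvBStep racetrack 0) (PySem.Dict.empty, []))).1 from by
    rw [pvBGo, dif_neg (List.cons_ne_nil start_pos [])]]
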